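-- pv_equiv track=rewrite | github.com/chunbo777/CODING_TEST | toss_test.py | solution
-- ===== SOURCE A (Python) =====
-- def solution(data):
--     data_list=list(data.lower())
--     new_list=[]
--     toss_list=[]
--     dict1={}
--     key_list=[]
--     for x in data_list:
--         dict1[x]=data_list.count(x)
--
--     for key, value in dict1.items():
--         if dict1[key]==max(dict1.values()):
--             key_list.append(key)
--     #key_list에 높은 빈도를 반환
--     key_list=list(set(key_list))
--     key_list.sort()
--     for data in key_list:
--         if data in  ["T", "O", "S", "t", "o", "s"]:
--             toss_list.append(data)
--         if data not in  ["T", "O", "S", "t", "o", "s"]: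
--             new_list.append(data)
--
--
--
--     list2= list(set(toss_list))
--     key_t=[]
--     key_o=[]
--     key_s=[]
--     for x in list2:
--         if x in[ "T" , "t"]:
--             key_t.append(x)
--         elif x in ["O", "o"]:
--             key_o.append(x)
--         elif x in ["S" , "s"]:
--             key_s.append(x)
--     key_tos=key_t+key_o+key_s
--
--     return (str(''.join(key_tos)).upper()).replace("S","SS")+str("".join(new_list)).lower()
-- ===== SOURCE B (Python) =====
-- def solution(data):
--     s = data.lower()
--     freq = {}
--     for c in s:
--         freq[c] = freq.get(c, 0) + 1
--     if not freq:
--         return ''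
--     m = max(freq.values())
--     top = [c for c, v in freq.items() if v == m]
--
--     def key(c):
--         i = 'tos'.find(c)
--         return i if i >= 0 else 3 + ord(c)
--
--     top.sort(key=key)
--     out = []
--     for c in top:
--         if c == 't':
--             out.append('T')
--         elif c == 'o':
--             out.append('O')
--         elif c == 's':
--             out.append('SS')
--         else:
--             out.append(c)
--     return ''.join(out)
-- ===== Notes on version B (the rewrite author's own statement) =====
-- stated objective: faster
-- what changed: One-pass frequency dict (instead of calling list.count for every character, which is quadratic), then a single keyed sort that puts t,o,s first in that order and the rest in character order, and one mapping pass that emits T/O/SS/c, replacing A's set/sort/partition/three-bucket/upper/replace pipeline.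
import Mathlib
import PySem

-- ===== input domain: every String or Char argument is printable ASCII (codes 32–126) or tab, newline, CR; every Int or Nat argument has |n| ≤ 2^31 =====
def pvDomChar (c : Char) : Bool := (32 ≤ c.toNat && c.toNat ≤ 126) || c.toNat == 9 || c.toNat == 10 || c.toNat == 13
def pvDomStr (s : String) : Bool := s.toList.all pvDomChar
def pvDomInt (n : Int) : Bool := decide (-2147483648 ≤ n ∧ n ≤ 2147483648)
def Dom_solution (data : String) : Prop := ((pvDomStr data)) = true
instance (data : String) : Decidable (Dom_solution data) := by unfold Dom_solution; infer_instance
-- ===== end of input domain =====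

-- B replaces A's quadratic per-character list.count and its set/sort/partition/bucket/upper/replace
-- pipeline by a one-pass frequency dict, one keyed sort and one mapping pass.

-- ===== PORT A =====
def solution (data : String) : String :=
  let data_list := PySem.Chars.lower data.toList
  let dict1 := data_list.foldl
    (fun d x => d.insert x ((PySem.List.count data_list x : Nat) : Int))
    (PySem.Dict.empty : PySem.Dict Char Int)
  let key_list := dict1.items.foldl
    (fun acc kv =>
      if some (dict1.getD kv.1 0) = PySem.List.max? dict1.values (fun v => v)
      then acc ++ [kv.1] else acc) ([] : List Char)
  let key_list := PySem.Set.ofList key_list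
  let key_list := PySem.List.sorted key_list (fun c => c)
  let tn := key_list.foldl
    (fun (p : List Char × List Char) c =>
      let p := if c ∈ (['T','O','S','t','o','s'] : List Char) then (p.1 ++ [c], p.2) else p
      if c ∉ (['T','O','S','t','o','s'] : List Char) then (p.1, p.2 ++ [c]) else p)
    (([], []) : List Char × List Char)
  let toss_list := tn.1
  let new_list := tn.2
  let list2 := PySem.Set.ofList toss_list
  let tr := list2.foldl
    (fun (t : List Char × List Char × List Char) x =>
      if x ∈ (['T','t'] : List Char) then (t.1 ++ [x], t.2.1, t.2.2)
      else if x ∈ (['O','o'] : List Char) then (t.1, t.2.1 ++ [x], t.2.2)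
      else if x ∈ (['S','s'] : List Char) then (t.1, t.2.1, t.2.2 ++ [x])
      else t)
    (([], [], []) : List Char × List Char × List Char)
  let key_tos := tr.1 ++ tr.2.1 ++ tr.2.2
  String.ofList (PySem.Chars.replace (PySem.Chars.upper key_tos) ['S'] ['S','S']
             ++ PySem.Chars.lower new_list)

-- ===== PORT B =====
def solution_alt (data : String) : String :=
  let s := PySem.Chars.lower data.toList
  let freq := s.foldl (fun d c => d.insert c (d.getD c 0 + 1))
                      (PySem.Dict.empty : PySem.Dict Char Int)
  if freq.items.isEmpty then "" else
    match PySem.List.max? freq.values (fun v => v) with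
    | none => ""   -- unreachable: freq is nonempty here (Python's max never raises in this branch)
    | some m =>
      let top := (freq.items.filter (fun kv => kv.2 = m)).map (fun kv => kv.1)
      let key := fun (c : Char) =>
        let i := PySem.Chars.find ['t','o','s'] [c]
        if i ≥ 0 then i else 3 + (c.toNat : Int)
      let tops := PySem.List.sorted top key
      let out := tops.foldl
        (fun (acc : List String) c =>
          if c = 't' then acc ++ ["T"]
          else if c = 'o' then acc ++ ["O"]
          else if c = 's' then acc ++ ["SS"]
          else acc ++ [String.ofList [c]]) ([] : List String)
      PySem.Str.join "" out

-- ===== PRECONDITION & SPEC =====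
def Spec_solution (data : String) (out : String) : Prop := out = solution_alt data
instance (data : String) (out : String) : Decidable (Spec_solution data out) := by unfold Spec_solution; infer_instance

-- ===== CLAIM (what is proved, stated in full; the proofs are below) =====
def Claim_equal_solution : Prop := ∀ (data : String), Dom_solution data → Spec_solution data (solution data)

-- ===== LEMMAS AND PROOFS =====

theorem foldA1 (l : List Char) (a1 a2 : List Char) :
    l.foldl (fun (p : List Char × List Char) c =>
      if c ∉ (['T','O','S','t','o','s'] : List Char) then
        ((if c ∈ (['T','O','S','t','o','s'] : List Char) then (p.1 ++ [c], p.2) else p).1,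
         (if c ∈ (['T','O','S','t','o','s'] : List Char) then (p.1 ++ [c], p.2) else p).2 ++ [c])
      else if c ∈ (['T','O','S','t','o','s'] : List Char) then (p.1 ++ [c], p.2) else p) (a1, a2)
    = (a1 ++ l.filter (fun c => decide (c ∈ (['T','O','S','t','o','s'] : List Char))),
       a2 ++ l.filter (fun c => decide (c ∉ (['T','O','S','t','o','s'] : List Char)))) := by
  have h1 := PySem.List.foldl_congr_mem (l := l) (init := (a1, a2))
    (f := fun (p : List Char × List Char) c =>
      if c ∉ (['T','O','S','t','o','s'] : List Char) then
        ((if c ∈ (['T','O','S','t','o','s'] : List Char) then (p.1 ++ [c], p.2) else p).1,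
         (if c ∈ (['T','O','S','t','o','s'] : List Char) then (p.1 ++ [c], p.2) else p).2 ++ [c])
      else if c ∈ (['T','O','S','t','o','s'] : List Char) then (p.1 ++ [c], p.2) else p)
    (g := fun (p : List Char × List Char) c =>
      ((if c ∈ (['T','O','S','t','o','s'] : List Char) then p.1 ++ [c] else p.1),
       (if c ∉ (['T','O','S','t','o','s'] : List Char) then p.2 ++ [c] else p.2)))
    (by intro p c _; by_cases h : c ∈ (['T','O','S','t','o','s'] : List Char) <;> simp [h])
  rw [h1,
    PySem.List.foldl_prod_mk (f := fun acc (c : Char) => if c ∈ (['T','O','S','t','o','s'] : List Char) then acc ++ [c] else acc)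
        (g := fun acc (c : Char) => if c ∉ (['T','O','S','t','o','s'] : List Char) then acc ++ [c] else acc),
    PySem.List.foldl_append_ite_eq_filter, PySem.List.foldl_append_ite_eq_filter]

def gmap (c : Char) : String :=
  if c = 't' then "T" else if c = 'o' then "O" else if c = 's' then "SS" else String.ofList [c]

theorem foldA2 (l : List Char) (a1 a2 a3 : List Char) :
    l.foldl (fun (t : List Char × List Char × List Char) x =>
      if x ∈ (['T','t'] : List Char) then (t.1 ++ [x], t.2.1, t.2.2)
      else if x ∈ (['O','o'] : List Char) then (t.1, t.2.1 ++ [x], t.2.2)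
      else if x ∈ (['S','s'] : List Char) then (t.1, t.2.1, t.2.2 ++ [x])
      else t) (a1, a2, a3)
    = (a1 ++ l.filter (fun x => decide (x ∈ (['T','t'] : List Char))),
       a2 ++ l.filter (fun x => decide (x ∉ (['T','t'] : List Char) ∧ x ∈ (['O','o'] : List Char))),
       a3 ++ l.filter (fun x => decide (x ∉ (['T','t'] : List Char) ∧ x ∉ (['O','o'] : List Char) ∧ x ∈ (['S','s'] : List Char)))) := by
  have h1 := PySem.List.foldl_congr_mem (l := l) (init := (a1, a2, a3))
    (f := fun (t : List Char × List Char × List Char) x =>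
      if x ∈ (['T','t'] : List Char) then (t.1 ++ [x], t.2.1, t.2.2)
      else if x ∈ (['O','o'] : List Char) then (t.1, t.2.1 ++ [x], t.2.2)
      else if x ∈ (['S','s'] : List Char) then (t.1, t.2.1, t.2.2 ++ [x])
      else t)
    (g := fun (t : List Char × List Char × List Char) x =>
      ((if x ∈ (['T','t'] : List Char) then t.1 ++ [x] else t.1),
       (if x ∉ (['T','t'] : List Char) ∧ x ∈ (['O','o'] : List Char) then t.2.1 ++ [x] else t.2.1),
       (if x ∉ (['T','t'] : List Char) ∧ x ∉ (['O','o'] : List Char) ∧ x ∈ (['S','s'] : List Char) then t.2.2 ++ [x] else t.2.2)))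
    (by
      intro t x _
      by_cases h1 : x ∈ (['T','t'] : List Char) <;>
        by_cases h2 : x ∈ (['O','o'] : List Char) <;>
          by_cases h3 : x ∈ (['S','s'] : List Char) <;> simp [h1, h2, h3])
  rw [h1,
    PySem.List.foldl_prod_mk (f := fun acc (x : Char) => if x ∈ (['T','t'] : List Char) then acc ++ [x] else acc)
      (g := fun (t : List Char × List Char) x =>
        ((if x ∉ (['T','t'] : List Char) ∧ x ∈ (['O','o'] : List Char) then t.1 ++ [x] else t.1),
         (if x ∉ (['T','t'] : List Char) ∧ x ∉ (['O','o'] : List Char) ∧ x ∈ (['S','s'] : List Char) then t.2 ++ [x] else t.2))),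
    PySem.List.foldl_prod_mk
      (f := fun acc (x : Char) => if x ∉ (['T','t'] : List Char) ∧ x ∈ (['O','o'] : List Char) then acc ++ [x] else acc)
      (g := fun acc (x : Char) => if x ∉ (['T','t'] : List Char) ∧ x ∉ (['O','o'] : List Char) ∧ x ∈ (['S','s'] : List Char) then acc ++ [x] else acc),
    PySem.List.foldl_append_ite_eq_filter, PySem.List.foldl_append_ite_eq_filter, PySem.List.foldl_append_ite_eq_filter]

theorem foldB (l : List Char) (acc : List String) :
    l.foldl (fun (acc : List String) c =>
          if c = 't' then acc ++ ["T"]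
          else if c = 'o' then acc ++ ["O"]
          else if c = 's' then acc ++ ["SS"]
          else acc ++ [String.ofList [c]]) acc = acc ++ l.map gmap := by
  have h1 := PySem.List.foldl_congr_mem (l := l) (init := acc)
    (f := fun (acc : List String) c =>
          if c = 't' then acc ++ ["T"]
          else if c = 'o' then acc ++ ["O"]
          else if c = 's' then acc ++ ["SS"]
          else acc ++ [String.ofList [c]])
    (g := fun (acc : List String) c => acc ++ [gmap c])
    (by intro a c _; by_cases h1 : c = 't' <;> by_cases h2 : c = 'o' <;> by_cases h3 : c = 's' <;> simp [gmap, h1, h2, h3])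
  rw [h1, PySem.List.foldl_append_singleton_eq_map]

theorem getD_foldl_insert_const (l : List Char) (v : Char → Int) (d : PySem.Dict Char Int) (k : Char) :
    (l.foldl (fun d x => d.insert x (v x)) d).getD k 0
      = if k ∈ l then v k else d.getD k 0 := by
  induction l generalizing d with
  | nil => simp
  | cons hd tl ih =>
    simp only [List.foldl_cons, ih, List.mem_cons]
    by_cases htl : k ∈ tl
    · simp [htl]
    · by_cases hk : k = hd <;> simp [htl, hk, PySem.Dict.getD_insert]

theorem itemsA (cs : List Char) :
    (cs.foldl (fun d x => d.insert x ((PySem.List.count cs x : Nat) : Int))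
      (PySem.Dict.empty : PySem.Dict Char Int)).items
    = (PySem.Set.ofList cs).map (fun k => (k, ((PySem.List.count cs k : Nat) : Int))) := by
  have hnd : (cs.foldl (fun d x => d.insert x ((PySem.List.count cs x : Nat) : Int))
      (PySem.Dict.empty : PySem.Dict Char Int)).keys.Nodup :=
    PySem.Dict.nodup_keys_foldl_insert _ _ _ PySem.Dict.nodup_keys_empty
  have hkeys : (cs.foldl (fun d x => d.insert x ((PySem.List.count cs x : Nat) : Int))
      (PySem.Dict.empty : PySem.Dict Char Int)).keys = PySem.Set.ofList cs := by
    rw [PySem.Dict.keys_foldl_insert]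
    simp [PySem.Set.ofList_eq_foldl, PySem.Set.update]
  rw [PySem.Dict.items_eq_map_keys _ hnd 0, hkeys]
  apply List.map_congr_left
  intro k hk
  have hmem : k ∈ cs := by
    have := PySem.Set.mem_ofList (xs := cs) (y := k)
    exact this.mp hk
  rw [getD_foldl_insert_const]
  simp [hmem]

theorem dictA_eq_counter (cs : List Char) :
    (cs.foldl (fun d x => d.insert x ((PySem.List.count cs x : Nat) : Int))
      (PySem.Dict.empty : PySem.Dict Char Int)) = PySem.Dict.counter cs := by
  apply PySem.Dict.ext
  rw [itemsA, PySem.Dict.items_counter]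
  simp [PySem.List.count]

theorem keylist_eq_top (cs : List Char) (m : Int)
    (hm : PySem.List.max? (PySem.Dict.counter cs : PySem.Dict Char Int).values (fun v => v) = some m) :
    (PySem.Dict.counter cs : PySem.Dict Char Int).items.foldl
      (fun acc kv =>
        if some ((PySem.Dict.counter cs : PySem.Dict Char Int).getD kv.1 0)
            = PySem.List.max? (PySem.Dict.counter cs : PySem.Dict Char Int).values (fun v => v)
        then acc ++ [kv.1] else acc) ([] : List Char)
    = ((PySem.Dict.counter cs : PySem.Dict Char Int).items.filter
        (fun kv => kv.2 = m)).map (fun kv => kv.1) := by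
  rw [PySem.List.foldl_append_ite (p := fun kv : Char × Int =>
        some ((PySem.Dict.counter cs : PySem.Dict Char Int).getD kv.1 0)
          = PySem.List.max? (PySem.Dict.counter cs : PySem.Dict Char Int).values (fun v => v))
      (f := fun kv : Char × Int => kv.1)]
  rw [List.nil_append]
  congr 1
  apply List.filter_congr
  intro kv hkv
  have hget : (PySem.Dict.counter cs : PySem.Dict Char Int).getD kv.1 0 = kv.2 :=
    PySem.Dict.getD_of_mem_items _ (by simpa using hkv) (PySem.Dict.nodup_keys_counter cs) 0
  rw [hget, hm]
  simp [eq_comm]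

theorem lowerChar_idem (c : Char) :
    PySem.Chars.lowerChar (PySem.Chars.lowerChar c) = PySem.Chars.lowerChar c := by
  simp only [PySem.Chars.lowerChar, PySem.Chars.isupper]
  split_ifs with h1 h2 <;> try rfl
  exfalso
  simp at h1 h2
  obtain ⟨a, b⟩ := h1; obtain ⟨d, e⟩ := h2
  have ha : 65 ≤ c.toNat := a
  have hb : c.toNat ≤ 90 := b
  have hv : Nat.isValidChar (c.toNat + 32) := Or.inl (by omega)
  have ht : (Char.ofNat (c.toNat + 32)).toNat = c.toNat + 32 := by
    unfold Char.ofNat; rw [dif_pos hv]; rfl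
  have hd : (65 : Nat) ≤ (Char.ofNat (c.toNat + 32)).toNat := d
  have he : (Char.ofNat (c.toNat + 32)).toNat ≤ 90 := e
  omega

theorem stable_of_mem_lower {c : Char} {l : List Char} (h : c ∈ PySem.Chars.lower l) :
    PySem.Chars.lowerChar c = c := by
  simp only [PySem.Chars.lower, List.mem_map] at h
  obtain ⟨x, -, rfl⟩ := h
  exact lowerChar_idem x

theorem mem_six_iff (c : Char) (h : PySem.Chars.lowerChar c = c) :
    decide (c ∈ (['T','O','S','t','o','s'] : List Char)) = decide (c ∈ (['t','o','s'] : List Char)) := by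
  by_cases ht : c = 'T'
  · subst ht; exact absurd h (by decide)
  by_cases ho : c = 'O'
  · subst ho; exact absurd h (by decide)
  by_cases hs : c = 'S'
  · subst hs; exact absurd h (by decide)
  simp [ht, ho, hs]

def bkey (c : Char) : Int :=
  let i := PySem.Chars.find ['t','o','s'] [c]
  if i ≥ 0 then i else 3 + (c.toNat : Int)

theorem bkey_not_tos {c : Char} (h : c ∉ (['t','o','s'] : List Char)) :
    bkey c = 3 + (c.toNat : Int) := by
  have hf : PySem.Chars.find ['t','o','s'] [c] = -1 := by
    rw [PySem.Chars.find_eq_neg_one_iff]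
    rw [List.singleton_infix_iff]
    exact h
  simp [bkey, hf]

theorem filter_eq_singleton (l : List Char) (a : Char) (hnd : l.Nodup) :
    l.filter (fun x => decide (x = a)) = if a ∈ l then [a] else [] := by
  induction l with
  | nil => simp
  | cons hd tl ih =>
    rw [List.nodup_cons] at hnd
    by_cases hh : hd = a
    · subst hh
      simp [hnd.1, ih hnd.2]
    · have : a ∈ hd :: tl ↔ a ∈ tl := by simp [Ne.symm hh]
      simp only [List.filter_cons]
      rw [ih hnd.2]
      by_cases hm : a ∈ tl <;> simp [hh, hm, Ne.symm hh]

theorem pairwise_lt_of_sorted_nodup (K : List Char) (hnd : K.Nodup) :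
    (PySem.List.sorted K (fun c => c)).Pairwise (· < ·) := by
  have h1 : (PySem.List.sorted K (fun c => c)).Pairwise (· ≤ ·) :=
    PySem.List.sorted_pairwise K (fun c => c)
  have h2 : (PySem.List.sorted K (fun c => c)).Nodup :=
    (PySem.List.sorted_perm K (fun c => c) false).nodup_iff.mpr hnd
  exact (h1.and h2).imp (fun h => lt_of_le_of_ne h.1 h.2)

theorem toss_perm (K : List Char) (hnd : K.Nodup) (hst : ∀ c ∈ K, PySem.Chars.lowerChar c = c) :
    ((if 't' ∈ K then ['t'] else []) ++ (if 'o' ∈ K then ['o'] else []) ++ (if 's' ∈ K then ['s'] else [])).Perm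
      ((PySem.List.sorted K (fun c => c)).filter (fun c => decide (c ∈ (['T','O','S','t','o','s'] : List Char)))) := by
  classical
  set L := PySem.List.sorted K (fun c => c) with hL
  have hperm : L.Perm K := PySem.List.sorted_perm K (fun c => c) false
  have hndL : L.Nodup := hperm.nodup_iff.mpr hnd
  have hstL : ∀ c ∈ L, PySem.Chars.lowerChar c = c := fun c hc => hst c (hperm.mem_iff.mp hc)
  have hmemL : ∀ a, a ∈ L ↔ a ∈ K := fun a => hperm.mem_iff
  -- six-filter = tos-filter
  have hsix : L.filter (fun c => decide (c ∈ (['T','O','S','t','o','s'] : List Char))) = L.filter (fun c => decide (c ∈ (['t','o','s'] : List Char))) := by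
    apply List.filter_congr
    intro c hc
    exact mem_six_iff c (hstL c hc)
  rw [hsix]
  set toss := L.filter (fun c => decide (c ∈ (['t','o','s'] : List Char))) with htoss
  have hp1 : (toss.filter (fun x => decide (x = 't')) ++ toss.filter (fun x => !decide (x = 't'))).Perm toss :=
    List.filter_append_perm _ toss
  have hp2 : ((toss.filter (fun x => !decide (x = 't'))).filter (fun x => decide (x = 'o'))
      ++ (toss.filter (fun x => !decide (x = 't'))).filter (fun x => !decide (x = 'o'))).Perm
      (toss.filter (fun x => !decide (x = 't'))) :=
    List.filter_append_perm _ _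
  -- identify the pieces
  have e1 : toss.filter (fun x => decide (x = 't')) = if 't' ∈ K then ['t'] else [] := by
    rw [htoss, List.filter_filter]
    have : L.filter (fun a => decide (a = 't') && decide (a ∈ (['t','o','s'] : List Char)))
        = L.filter (fun a => decide (a = 't')) := by
      apply List.filter_congr
      intro c hc
      by_cases h : c = 't' <;> simp [h]
    rw [this, filter_eq_singleton L 't' hndL]
    simp only [hmemL]
  have e2 : (toss.filter (fun x => !decide (x = 't'))).filter (fun x => decide (x = 'o'))
      = if 'o' ∈ K then ['o'] else [] := by
    rw [htoss, List.filter_filter, List.filter_filter]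
    have : L.filter (fun a => decide (a = 'o') && !decide (a = 't') && decide (a ∈ (['t','o','s'] : List Char)))
        = L.filter (fun a => decide (a = 'o')) := by
      apply List.filter_congr
      intro c hc
      by_cases h : c = 'o' <;> simp [h]
    rw [this, filter_eq_singleton L 'o' hndL]
    simp only [hmemL]
  have e3 : (toss.filter (fun x => !decide (x = 't'))).filter (fun x => !decide (x = 'o'))
      = if 's' ∈ K then ['s'] else [] := by
    rw [htoss, List.filter_filter, List.filter_filter]
    have : L.filter (fun a => !decide (a = 'o') && !decide (a = 't') && decide (a ∈ (['t','o','s'] : List Char)))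
        = L.filter (fun a => decide (a = 's')) := by
      apply List.filter_congr
      intro c hc
      by_cases h1 : c = 't' <;> by_cases h2 : c = 'o' <;> by_cases h3 : c = 's' <;>
        simp [h1, h2, h3]
    rw [this, filter_eq_singleton L 's' hndL]
    simp only [hmemL]
  have hfin : ((toss.filter (fun x => decide (x = 't')))
      ++ ((toss.filter (fun x => !decide (x = 't'))).filter (fun x => decide (x = 'o'))
        ++ (toss.filter (fun x => !decide (x = 't'))).filter (fun x => !decide (x = 'o')))).Perm toss :=
    (hp2.append_left _).trans hp1
  rw [e1, e2, e3] at hfin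
  rw [List.append_assoc]
  exact hfin

theorem mem_new_bkey {K : List Char} (hst : ∀ c ∈ K, PySem.Chars.lowerChar c = c) {c : Char}
    (hc : c ∈ (PySem.List.sorted K (fun c => c)).filter (fun c => decide (c ∉ (['T','O','S','t','o','s'] : List Char)))) :
    bkey c = 3 + (c.toNat : Int) := by
  rw [List.mem_filter] at hc
  have hmem : c ∈ K := ((PySem.List.sorted_perm K (fun c => c) false).mem_iff).mp hc.1
  have hstc := hst c hmem
  have hnot : c ∉ (['T','O','S','t','o','s'] : List Char) := by simpa using hc.2
  apply bkey_not_tos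
  intro hmem3
  apply hnot
  simp at hmem3 ⊢
  tauto

theorem sortB (K : List Char) (hnd : K.Nodup) (hst : ∀ c ∈ K, PySem.Chars.lowerChar c = c) :
    PySem.List.sorted K bkey
      = (if 't' ∈ K then ['t'] else []) ++ (if 'o' ∈ K then ['o'] else []) ++ (if 's' ∈ K then ['s'] else [])
        ++ (PySem.List.sorted K (fun c => c)).filter (fun c => decide (c ∉ (['T','O','S','t','o','s'] : List Char))) := by
  apply PySem.List.sorted_eq_of_perm_of_pairwise_lt
  · have h1 := toss_perm K hnd hst
    have h2 := List.filter_append_perm (fun c => decide (c ∈ (['T','O','S','t','o','s'] : List Char))) (PySem.List.sorted K (fun c => c))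
    have hneg : (PySem.List.sorted K (fun c => c)).filter (fun c => !decide (c ∈ (['T','O','S','t','o','s'] : List Char)))
        = (PySem.List.sorted K (fun c => c)).filter (fun c => decide (c ∉ (['T','O','S','t','o','s'] : List Char))) := by
      apply List.filter_congr; intro c _; simp
    rw [hneg] at h2
    exact (h1.append_right _).trans (h2.trans (PySem.List.sorted_perm K (fun c => c) false))
  · -- pairwise strict bkey order
    have hnew : ((PySem.List.sorted K (fun c => c)).filter (fun c => decide (c ∉ (['T','O','S','t','o','s'] : List Char)))).Pairwise
        (fun a b => bkey a < bkey b) := by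
      have hlt := (pairwise_lt_of_sorted_nodup K hnd).sublist
        (List.filter_sublist (p := fun c => decide (c ∉ (['T','O','S','t','o','s'] : List Char))) (l := PySem.List.sorted K (fun c => c)))
      refine hlt.imp_of_mem ?_
      intro a b ha hb hab
      rw [mem_new_bkey hst ha, mem_new_bkey hst hb]
      have : a.toNat < b.toNat := hab
      omega
    have hnewge : ∀ b ∈ (PySem.List.sorted K (fun c => c)).filter (fun c => decide (c ∉ (['T','O','S','t','o','s'] : List Char))),
        (3 : Int) ≤ bkey b := by
      intro b hb
      rw [mem_new_bkey hst hb]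
      omega
    have hheadpw : ((if 't' ∈ K then ['t'] else []) ++ (if 'o' ∈ K then ['o'] else [])
        ++ (if 's' ∈ K then ['s'] else [])).Pairwise (fun a b => bkey a < bkey b) := by
      by_cases ht : 't' ∈ K <;> by_cases ho : 'o' ∈ K <;> by_cases hs : 's' ∈ K <;>
        simp [ht, ho, hs] <;> decide
    have hheadmem : ∀ a ∈ ((if 't' ∈ K then ['t'] else []) ++ (if 'o' ∈ K then ['o'] else [])
        ++ (if 's' ∈ K then ['s'] else [])), bkey a ≤ 2 := by
      intro a ha
      by_cases ht : 't' ∈ K <;> by_cases ho : 'o' ∈ K <;> by_cases hs : 's' ∈ K <;>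
        simp [ht, ho, hs] at ha <;> rcases ha with rfl | rfl | rfl <;> decide
    rw [List.pairwise_append]
    refine ⟨hheadpw, hnew, ?_⟩
    intro a ha b hb
    exact lt_of_le_of_lt (hheadmem a ha) (lt_of_lt_of_le (by omega) (hnewge b hb))

theorem stable_cases (c : Char) (h : PySem.Chars.lowerChar c = c) :
    c ≠ 'T' ∧ c ≠ 'O' ∧ c ≠ 'S' := by
  refine ⟨?_, ?_, ?_⟩ <;> rintro rfl <;> exact absurd h (by decide)

theorem headsA (K : List Char) (hnd : K.Nodup) (hst : ∀ c ∈ K, PySem.Chars.lowerChar c = c) :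
    (((PySem.List.sorted K (fun c => c)).filter (fun c => decide (c ∈ (['T','O','S','t','o','s'] : List Char)))).filter
        (fun x => decide (x ∈ (['T','t'] : List Char))) = if 't' ∈ K then ['t'] else [])
    ∧ (((PySem.List.sorted K (fun c => c)).filter (fun c => decide (c ∈ (['T','O','S','t','o','s'] : List Char)))).filter
        (fun x => decide (x ∉ (['T','t'] : List Char) ∧ x ∈ (['O','o'] : List Char))) = if 'o' ∈ K then ['o'] else [])
    ∧ (((PySem.List.sorted K (fun c => c)).filter (fun c => decide (c ∈ (['T','O','S','t','o','s'] : List Char)))).filter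
        (fun x => decide (x ∉ (['T','t'] : List Char) ∧ x ∉ (['O','o'] : List Char) ∧ x ∈ (['S','s'] : List Char)))
        = if 's' ∈ K then ['s'] else []) := by
  have hperm : (PySem.List.sorted K (fun c => c)).Perm K := PySem.List.sorted_perm K (fun c => c) false
  have hndL : (PySem.List.sorted K (fun c => c)).Nodup := hperm.nodup_iff.mpr hnd
  have hstL : ∀ c ∈ PySem.List.sorted K (fun c => c), PySem.Chars.lowerChar c = c :=
    fun c hc => hst c (hperm.mem_iff.mp hc)
  have hmemL : ∀ a : Char, a ∈ PySem.List.sorted K (fun c => c) ↔ a ∈ K := fun a => hperm.mem_iff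
  refine ⟨?_, ?_, ?_⟩ <;> rw [List.filter_filter]
  · have : (PySem.List.sorted K (fun c => c)).filter
        (fun a => decide (a ∈ (['T','t'] : List Char)) && decide (a ∈ (['T','O','S','t','o','s'] : List Char)))
        = (PySem.List.sorted K (fun c => c)).filter (fun x => decide (x = 't')) := by
      apply List.filter_congr
      intro c hc
      obtain ⟨h1, h2, h3⟩ := stable_cases c (hstL c hc)
      by_cases h : c = 't' <;> simp [h, h1, h2, h3]
    rw [this, filter_eq_singleton _ _ hndL]
    simp only [hmemL]
  · have : (PySem.List.sorted K (fun c => c)).filter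
        (fun a => decide (a ∉ (['T','t'] : List Char) ∧ a ∈ (['O','o'] : List Char)) && decide (a ∈ (['T','O','S','t','o','s'] : List Char)))
        = (PySem.List.sorted K (fun c => c)).filter (fun x => decide (x = 'o')) := by
      apply List.filter_congr
      intro c hc
      obtain ⟨h1, h2, h3⟩ := stable_cases c (hstL c hc)
      by_cases h : c = 'o' <;> by_cases h' : c = 't' <;> simp [h, h', h1, h2, h3]
    rw [this, filter_eq_singleton _ _ hndL]
    simp only [hmemL]
  · have : (PySem.List.sorted K (fun c => c)).filter
        (fun a => decide (a ∉ (['T','t'] : List Char) ∧ a ∉ (['O','o'] : List Char) ∧ a ∈ (['S','s'] : List Char)) && decide (a ∈ (['T','O','S','t','o','s'] : List Char)))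
        = (PySem.List.sorted K (fun c => c)).filter (fun x => decide (x = 's')) := by
      apply List.filter_congr
      intro c hc
      obtain ⟨h1, h2, h3⟩ := stable_cases c (hstL c hc)
      by_cases h : c = 's' <;> by_cases h' : c = 't' <;> by_cases h'' : c = 'o' <;>
        simp [h, h', h'', h1, h2, h3]
    rw [this, filter_eq_singleton _ _ hndL]
    simp only [hmemL]

theorem join_nil_flatten (l : List (List Char)) : PySem.Chars.join [] l = l.flatten := by
  simp [PySem.Chars.join, List.intercalate]
  induction l with
  | nil => rfl
  | cons h t ih =>
    cases t with
    | nil => simp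
    | cons h2 t2 => simp_all [List.intersperse]

theorem finalEq (K : List Char) (hst : ∀ c ∈ K, PySem.Chars.lowerChar c = c) :
    PySem.Chars.replace (PySem.Chars.upper
        ((if 't' ∈ K then ['t'] else []) ++ (if 'o' ∈ K then ['o'] else []) ++ (if 's' ∈ K then ['s'] else []))) ['S'] ['S','S']
      ++ PySem.Chars.lower ((PySem.List.sorted K (fun c => c)).filter (fun c => decide (c ∉ (['T','O','S','t','o','s'] : List Char))))
    = PySem.Chars.join [] ((((if 't' ∈ K then ['t'] else []) ++ (if 'o' ∈ K then ['o'] else []) ++ (if 's' ∈ K then ['s'] else [])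
        ++ (PySem.List.sorted K (fun c => c)).filter (fun c => decide (c ∉ (['T','O','S','t','o','s'] : List Char)))).map (fun c => (gmap c).toList))) := by
  have hperm : (PySem.List.sorted K (fun c => c)).Perm K := PySem.List.sorted_perm K (fun c => c) false
  set new := (PySem.List.sorted K (fun c => c)).filter (fun c => decide (c ∉ (['T','O','S','t','o','s'] : List Char))) with hnewdef
  have hnewp : ∀ c ∈ new, PySem.Chars.lowerChar c = c ∧ c ∉ (['t','o','s'] : List Char) := by
    intro c hc
    rw [hnewdef, List.mem_filter] at hc
    have hstc := hst c (hperm.mem_iff.mp hc.1)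
    refine ⟨hstc, ?_⟩
    intro h3
    have h6 : c ∈ (['T','O','S','t','o','s'] : List Char) := by
      simp at h3 ⊢
      tauto
    simpa [h6] using hc.2
  have hlower : PySem.Chars.lower new = new := by
    simp only [PySem.Chars.lower]
    conv_rhs => rw [← List.map_id new]
    apply List.map_congr_left
    intro c hc
    exact (hnewp c hc).1
  have hmapnew : new.map (fun c => (gmap c).toList) = new.map (fun c => [c]) := by
    apply List.map_congr_left
    intro c hc
    obtain ⟨-, h3⟩ := hnewp c hc
    have : gmap c = String.ofList [c] := by
      simp only [gmap]
      have h1 : c ≠ 't' := by intro h; exact h3 (by simp [h])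
      have h2 : c ≠ 'o' := by intro h; exact h3 (by simp [h])
      have h4 : c ≠ 's' := by intro h; exact h3 (by simp [h])
      simp [h1, h2, h4]
    rw [this]
    simp
  rw [join_nil_flatten, List.append_assoc, List.map_append, List.flatten_append, hmapnew, hlower]
  have hflat : (new.map (fun c => [c])).flatten = new := by
    rw [← join_nil_flatten, PySem.Chars.join_nil_singletons]
  rw [hflat]
  congr 1
  rw [← join_nil_flatten]
  by_cases ht : 't' ∈ K <;> by_cases ho : 'o' ∈ K <;> by_cases hs : 's' ∈ K <;>
    simp [ht, ho, hs] <;> decide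


theorem combinedAB (K : List Char) (hnd : K.Nodup) (hst : ∀ c ∈ K, PySem.Chars.lowerChar c = c) :
    PySem.Chars.replace (PySem.Chars.upper
        (((if 't' ∈ K then ['t'] else []) ++ (if 'o' ∈ K then ['o'] else [])) ++ (if 's' ∈ K then ['s'] else [])))
        ['S'] ['S','S']
      ++ PySem.Chars.lower ((PySem.List.sorted K (fun c => c)).filter
          (fun c => decide (c ∉ (['T','O','S','t','o','s'] : List Char))))
    = PySem.Chars.join "".toList ((PySem.List.sorted K bkey).map gmap |>.map String.toList) := by
  have h1 := finalEq K hst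
  rw [sortB K hnd hst, List.map_map]
  simpa using h1

theorem solution_equal (data : String) : solution data = solution_alt data := by
  have hst : ∀ c ∈ PySem.Chars.lower data.toList, PySem.Chars.lowerChar c = c :=
    fun c hc => stable_of_mem_lower hc
  simp only [solution, solution_alt]
  rw [dictA_eq_counter]
  rw [PySem.Dict.foldl_insert_getD_add_one_eq_counter]
  by_cases hcs : PySem.Chars.lower data.toList = []
  · rw [hcs]
    decide
  · -- nonempty
    have hvals : (PySem.Dict.counter (PySem.Chars.lower data.toList) : PySem.Dict Char Int).values ≠ [] := by
      intro hv
      have hnil : (PySem.Set.ofList (PySem.Chars.lower data.toList) : List Char) = [] := by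
        have h2 : (PySem.Dict.counter (PySem.Chars.lower data.toList) : PySem.Dict Char Int).items.map Prod.snd = [] := by
          simpa [PySem.Dict.values] using hv
        rw [PySem.Dict.items_counter] at h2
        simpa using h2
      cases hcse : PySem.Chars.lower data.toList with
      | nil => exact hcs hcse
      | cons c t =>
        have hmem : c ∈ (PySem.Set.ofList (PySem.Chars.lower data.toList) : List Char) := by
          rw [PySem.Set.mem_ofList, hcse]; simp
        rw [hnil] at hmem
        simp at hmem
    obtain ⟨m, hm⟩ : ∃ m, PySem.List.max?
        (PySem.Dict.counter (PySem.Chars.lower data.toList) : PySem.Dict Char Int).values (fun v => v) = some m := by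
      cases hmx : PySem.List.max?
          (PySem.Dict.counter (PySem.Chars.lower data.toList) : PySem.Dict Char Int).values (fun v => v) with
      | none => exact absurd ((PySem.List.max?_eq_none_iff _ _).mp hmx) hvals
      | some m => exact ⟨m, rfl⟩
    rw [keylist_eq_top _ _ hm, hm]
    have hitems : ((PySem.Dict.counter (PySem.Chars.lower data.toList) : PySem.Dict Char Int).items).isEmpty = false := by
      rw [List.isEmpty_eq_false_iff]
      intro hv
      apply hvals
      simp [PySem.Dict.values, hv]
    rw [hitems]
    simp only [Bool.false_eq_true, if_false]
    set K := ((PySem.Dict.counter (PySem.Chars.lower data.toList) : PySem.Dict Char Int).items.filter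
        (fun kv => decide (kv.2 = m))).map (fun kv => kv.1) with hK
    have hKsub : K.Sublist ((PySem.Dict.counter (PySem.Chars.lower data.toList) : PySem.Dict Char Int).items.map Prod.fst) := by
      rw [hK]
      exact List.Sublist.map _ List.filter_sublist
    have hKnd : K.Nodup := by
      refine List.Nodup.sublist hKsub ?_
      have h := PySem.Dict.nodup_keys_counter (κ := Char) (PySem.Chars.lower data.toList)
      simpa [PySem.Dict.keys] using h
    have hKst : ∀ c ∈ K, PySem.Chars.lowerChar c = c := by
      intro c hc
      apply hst
      have hmemk : c ∈ ((PySem.Dict.counter (PySem.Chars.lower data.toList) : PySem.Dict Char Int).items.map Prod.fst) :=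
        hKsub.mem hc
      have hkeys : ((PySem.Dict.counter (PySem.Chars.lower data.toList) : PySem.Dict Char Int).items.map Prod.fst)
          = (PySem.Set.ofList (PySem.Chars.lower data.toList) : List Char) := by
        have h := PySem.Dict.keys_counter (κ := Char) (PySem.Chars.lower data.toList)
        simpa [PySem.Dict.keys] using h
      rw [hkeys, PySem.Set.mem_ofList] at hmemk
      exact hmemk
    rw [PySem.Set.ofList_eq_self_of_nodup K hKnd]
    rw [foldA1]
    simp only [List.nil_append]
    have hndL : ((PySem.List.sorted K (fun c => c)).filter
        (fun c => decide (c ∈ (['T','O','S','t','o','s'] : List Char)))).Nodup :=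
      List.Nodup.sublist List.filter_sublist
        (((PySem.List.sorted_perm K (fun c => c) false).nodup_iff).mpr hKnd)
    rw [PySem.Set.ofList_eq_self_of_nodup _ hndL]
    rw [foldA2]
    simp only [List.nil_append]
    obtain ⟨e1, e2, e3⟩ := headsA K hKnd hKst
    rw [e1, e2, e3]
    rw [foldB]
    simp only [List.nil_append]
    refine String.toList_inj.mp ?_
    rw [PySem.Str.toList_join, String.toList_ofList]
    exact combinedAB K hKnd hKst

-- ===== VERDICT (by name: the statement is the Claim_ definition above) =====
theorem solution_spec : Claim_equal_solution := by
  intro data _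
  unfold Spec_solution
  exact solution_equal data
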